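-- pv_equiv track=rewrite | github.com/dan-serraf/jeu_bataille_navale_avec_resolution_ia | code/GenereGrille.py | calcul_nombre_facon_horizontal
-- ===== SOURCE A (Python) =====
-- def depassement_plateau(x, taille_bateau, taille_plateau):
--     return x + taille_bateau > taille_plateau
--
-- def calcul_nombre_facon_horizontal(taille_bateau, longeur_plateau, largeur_plateau):
--     compteur_largeur = 0
--
--     # Nombre de position sur une largeur
--     for i in range(0, largeur_plateau):
--         if not depassement_plateau(i, taille_bateau, largeur_plateau):
--             compteur_largeur += 1
--         else:
--             break
--     # Nombre de position sur toutes les largeurs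
--     return compteur_largeur * longeur_plateau
-- ===== SOURCE B (Python) =====
-- def calcul_nombre_facon_horizontal(taille_bateau, longeur_plateau, largeur_plateau):
--     return max(0, min(largeur_plateau, largeur_plateau - taille_bateau + 1)) * longeur_plateau
-- ===== Notes on version B (the rewrite author's own statement) =====
-- stated objective: simpler
-- what changed: Replaces the per-column counting loop (with break) by the closed form max(0, min(largeur, largeur - taille + 1)) * longeur.
import Mathlib
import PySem

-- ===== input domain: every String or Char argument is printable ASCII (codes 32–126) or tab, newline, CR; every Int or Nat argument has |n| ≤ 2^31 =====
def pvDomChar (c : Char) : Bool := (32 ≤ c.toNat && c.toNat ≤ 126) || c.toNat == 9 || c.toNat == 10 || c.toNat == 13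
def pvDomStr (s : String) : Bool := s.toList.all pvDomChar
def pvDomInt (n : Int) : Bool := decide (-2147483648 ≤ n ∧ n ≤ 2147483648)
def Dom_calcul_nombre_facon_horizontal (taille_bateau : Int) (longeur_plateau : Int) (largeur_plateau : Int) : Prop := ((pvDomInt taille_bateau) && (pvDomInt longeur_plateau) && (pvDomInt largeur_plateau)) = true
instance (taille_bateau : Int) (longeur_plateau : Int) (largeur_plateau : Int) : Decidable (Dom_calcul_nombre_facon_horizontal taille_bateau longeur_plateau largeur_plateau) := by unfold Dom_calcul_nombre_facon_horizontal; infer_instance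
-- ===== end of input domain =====

-- B replaces A's per-column counting loop (with break) by the closed form
-- max(0, min(largeur, largeur - taille + 1)) * longeur (a closed form instead of a loop).

-- ===== PORT A =====
def depassement_plateau (x taille_bateau taille_plateau : Int) : Bool :=
  x + taille_bateau > taille_plateau

-- A's for-loop with break, as structural recursion over the range list
def pvLoopA (taille_bateau largeur_plateau : Int) : List Int → Int → Int
  | [], compteur => compteur
  | i :: rest, compteur =>
    if ¬ (depassement_plateau i taille_bateau largeur_plateau = true) then
      pvLoopA taille_bateau largeur_plateau rest (compteur + 1)
    else compteur

def calcul_nombre_facon_horizontal (taille_bateau : Int) (longeur_plateau : Int) (largeur_plateau : Int) : Int :=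
  pvLoopA taille_bateau largeur_plateau (PySem.List.pyRange 0 largeur_plateau 1) 0 * longeur_plateau

-- ===== PORT B =====
def calcul_nombre_facon_horizontal_alt (taille_bateau : Int) (longeur_plateau : Int) (largeur_plateau : Int) : Int :=
  max 0 (min largeur_plateau (largeur_plateau - taille_bateau + 1)) * longeur_plateau

-- ===== PRECONDITION & SPEC =====
def Spec_calcul_nombre_facon_horizontal (taille_bateau : Int) (longeur_plateau : Int) (largeur_plateau : Int) (out : Int) : Prop := out = calcul_nombre_facon_horizontal_alt taille_bateau longeur_plateau largeur_plateau
instance (taille_bateau : Int) (longeur_plateau : Int) (largeur_plateau : Int) (out : Int) : Decidable (Spec_calcul_nombre_facon_horizontal taille_bateau longeur_plateau largeur_plateau out) := by unfold Spec_calcul_nombre_facon_horizontal; infer_instance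

-- ===== CLAIM (what is proved, stated in full; the proofs are below) =====
def Claim_equal_calcul_nombre_facon_horizontal : Prop := ∀ (taille_bateau : Int) (longeur_plateau : Int) (largeur_plateau : Int), Dom_calcul_nombre_facon_horizontal taille_bateau longeur_plateau largeur_plateau → Spec_calcul_nombre_facon_horizontal taille_bateau longeur_plateau largeur_plateau (calcul_nombre_facon_horizontal taille_bateau longeur_plateau largeur_plateau)

-- ===== LEMMAS AND PROOFS =====

lemma pvLoopA_pyRange (t L : Int) (n : Nat) : ∀ (k c : Int), L - k ≤ n →
    pvLoopA t L (PySem.List.pyRange k L 1) c = c + max 0 (min (L - k) (L - t + 1 - k)) := by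
  induction n with
  | zero =>
    intro k c h
    rw [PySem.List.pyRange_one_eq_nil (by omega)]
    simp [pvLoopA]; omega
  | succ m ih =>
    intro k c h
    by_cases hk : k < L
    · rw [PySem.List.pyRange_one_cons hk]
      by_cases hd : k + t > L
      · simp [pvLoopA, depassement_plateau, hd]; omega
      · simp only [pvLoopA, depassement_plateau]
        rw [if_pos (by simpa using hd)]
        rw [ih (k + 1) (c + 1) (by omega)]
        omega
    · rw [PySem.List.pyRange_one_eq_nil (by omega)]
      simp [pvLoopA]; omega

-- ===== VERDICT (by name: the statement is the Claim_ definition above) =====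
theorem calcul_nombre_facon_horizontal_spec : Claim_equal_calcul_nombre_facon_horizontal := by
  intro t l L _
  unfold Spec_calcul_nombre_facon_horizontal calcul_nombre_facon_horizontal calcul_nombre_facon_horizontal_alt
  rw [pvLoopA_pyRange t L (L.toNat) 0 0 (by omega)]
  congr 1
  omega
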